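-- pv_equiv track=rewrite | github.com/jovanovicbogdan/gaussian_processor | qm_parser.py | sort_elements_for_genecp
-- ===== SOURCE A (Python) =====
-- periodic_table = {
--     1: "H", 2: "He", 3: "Li", 4: "Be", 5: "B", 6: "C", 7: "N", 8: "O", 9: "F", 10: "Ne",
--     11: "Na", 12: "Mg", 13: "Al", 14: "Si", 15: "P", 16: "S", 17: "Cl", 18: "Ar", 19: "K", 20: "Ca",
--     21: "Sc", 22: "Ti", 23: "V", 24: "Cr", 25: "Mn", 26: "Fe", 27: "Co", 28: "Ni", 29: "Cu", 30: "Zn",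
--     31: "Ga", 32: "Ge", 33: "As", 34: "Se", 35: "Br", 36: "Kr", 37: "Rb", 38: "Sr", 39: "Y", 40: "Zr",
--     41: "Nb", 42: "Mo", 43: "Tc", 44: "Ru", 45: "Rh", 46: "Pd", 47: "Ag", 48: "Cd", 49: "In", 50: "Sn",
--     51: "Sb", 52: "Te", 53: "I", 54: "Xe", 55: "Cs", 56: "Ba", 57: "La", 58: "Ce", 59: "Pr", 60: "Nd",
--     61: "Pm", 62: "Sm", 63: "Eu", 64: "Gd", 65: "Tb", 66: "Dy", 67: "Ho", 68: "Er", 69: "Tm", 70: "Yb",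
--     71: "Lu", 72: "Hf", 73: "Ta", 74: "W", 75: "Re", 76: "Os", 77: "Ir", 78: "Pt", 79: "Au", 80: "Hg",
--     81: "Tl", 82: "Pb", 83: "Bi", 84: "Po", 85: "At", 86: "Rn", 87: "Fr", 88: "Ra", 89: "Ac", 90: "Th",
--     91: "Pa", 92: "U", 93: "Np", 94: "Pu", 95: "Am", 96: "Cm", 97: "Bk", 98: "Cf", 99: "Es", 100: "Fm",
--     101: "Md", 102: "No", 103: "Lr", 104: "Rf", 105: "Db", 106: "Sg", 107: "Bh", 108: "Hs", 109: "Mt", 110: "Ds",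
--     111: "Rg", 112: "Cn", 113: "Nh", 114: "Fl", 115: "Mc", 116: "Lv", 117: "Ts", 118: "Og"
-- }
--
-- def sort_elements_for_genecp(elements):
--     """
--     Sorts elements so that first is always C, then H and then the rest of elements in the order of the periodic table.
--     :param elements: List of elements to sort
--     :return:
--     """
--     atomic_numbers = {symbol: num for num, symbol in
--                       periodic_table.items()}  # Create a reverse lookup to get atomic numbers for symbols
--
--     def sort_key(element):
--         if element == "C":
--             return (0,)
--         elif element == "H":
--             return (1,)
--         else:
--             return (2, atomic_numbers.get(element,
--                                           str('X')))  # Return a tuple where second item is the atomic number or X if not found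
--
--     return sorted(elements, key=sort_key)
-- ===== SOURCE B (Python) =====
-- # Counting sort over the periodic table: one pass buckets C's, H's, known rest
-- # (as counts) and unknown rest, then emits symbols in atomic-number order.
-- element_symbols = ("H He Li Be B C N O F Ne Na Mg Al Si P S Cl Ar K Ca "
--                    "Sc Ti V Cr Mn Fe Co Ni Cu Zn Ga Ge As Se Br Kr Rb Sr Y Zr "
--                    "Nb Mo Tc Ru Rh Pd Ag Cd In Sn Sb Te I Xe Cs Ba La Ce Pr Nd "
--                    "Pm Sm Eu Gd Tb Dy Ho Er Tm Yb Lu Hf Ta W Re Os Ir Pt Au Hg "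
--                    "Tl Pb Bi Po At Rn Fr Ra Ac Th Pa U Np Pu Am Cm Bk Cf Es Fm "
--                    "Md No Lr Rf Db Sg Bh Hs Mt Ds Rg Cn Nh Fl Mc Lv Ts Og").split()
--
--
-- def sort_elements_for_genecp(elements):
--     """C's first, then H's, then the rest in periodic-table order via a
--     counting sort (no comparison sort); unknown symbols keep encounter order."""
--     c_list, h_list, counts, unknown = [], [], {}, []
--     for e in elements:
--         if e == "C":
--             c_list.append(e)
--         elif e == "H":
--             h_list.append(e)
--         elif e in element_symbols:
--             counts[e] = counts.get(e, 0) + 1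
--         else:
--             unknown.append(e)
--     result = c_list + h_list
--     for s in element_symbols:
--         result += [s] * counts.get(s, 0)
--     return result + unknown
-- ===== Notes on version B (the rewrite author's own statement) =====
-- stated objective: alternative
-- what changed: B replaces A's comparison sort under a 3-way tuple key by a counting sort: one pass buckets C's, H's, per-symbol counts of known elements and unknowns, then emits symbols in periodic-table order from the counts.
import Mathlib
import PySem

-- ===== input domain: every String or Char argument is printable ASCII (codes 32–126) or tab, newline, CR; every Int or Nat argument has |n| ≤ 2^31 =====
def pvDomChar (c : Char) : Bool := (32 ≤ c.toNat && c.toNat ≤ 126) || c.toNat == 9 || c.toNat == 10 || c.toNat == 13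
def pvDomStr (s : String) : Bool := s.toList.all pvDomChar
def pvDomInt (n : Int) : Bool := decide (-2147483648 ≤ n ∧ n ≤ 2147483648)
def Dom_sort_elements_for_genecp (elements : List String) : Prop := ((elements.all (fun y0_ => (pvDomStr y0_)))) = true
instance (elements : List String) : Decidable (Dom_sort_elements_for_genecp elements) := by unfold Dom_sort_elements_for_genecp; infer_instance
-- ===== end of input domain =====

-- B replaces A's comparison sort by a counting sort over the periodic table
-- (different algorithm, similar cost).


-- ===== PORT A =====
-- module-level constant periodic_table
def periodicTable : PySem.Dict Int String := PySem.Dict.ofList [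
  (1, "H"), (2, "He"), (3, "Li"), (4, "Be"), (5, "B"), (6, "C"), (7, "N"), (8, "O"), (9, "F"), (10, "Ne"),
  (11, "Na"), (12, "Mg"), (13, "Al"), (14, "Si"), (15, "P"), (16, "S"), (17, "Cl"), (18, "Ar"), (19, "K"), (20, "Ca"),
  (21, "Sc"), (22, "Ti"), (23, "V"), (24, "Cr"), (25, "Mn"), (26, "Fe"), (27, "Co"), (28, "Ni"), (29, "Cu"), (30, "Zn"),
  (31, "Ga"), (32, "Ge"), (33, "As"), (34, "Se"), (35, "Br"), (36, "Kr"), (37, "Rb"), (38, "Sr"), (39, "Y"), (40, "Zr"),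
  (41, "Nb"), (42, "Mo"), (43, "Tc"), (44, "Ru"), (45, "Rh"), (46, "Pd"), (47, "Ag"), (48, "Cd"), (49, "In"), (50, "Sn"),
  (51, "Sb"), (52, "Te"), (53, "I"), (54, "Xe"), (55, "Cs"), (56, "Ba"), (57, "La"), (58, "Ce"), (59, "Pr"), (60, "Nd"),
  (61, "Pm"), (62, "Sm"), (63, "Eu"), (64, "Gd"), (65, "Tb"), (66, "Dy"), (67, "Ho"), (68, "Er"), (69, "Tm"), (70, "Yb"),
  (71, "Lu"), (72, "Hf"), (73, "Ta"), (74, "W"), (75, "Re"), (76, "Os"), (77, "Ir"), (78, "Pt"), (79, "Au"), (80, "Hg"),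
  (81, "Tl"), (82, "Pb"), (83, "Bi"), (84, "Po"), (85, "At"), (86, "Rn"), (87, "Fr"), (88, "Ra"), (89, "Ac"), (90, "Th"),
  (91, "Pa"), (92, "U"), (93, "Np"), (94, "Pu"), (95, "Am"), (96, "Cm"), (97, "Bk"), (98, "Cf"), (99, "Es"), (100, "Fm"),
  (101, "Md"), (102, "No"), (103, "Lr"), (104, "Rf"), (105, "Db"), (106, "Sg"), (107, "Bh"), (108, "Hs"), (109, "Mt"), (110, "Ds"),
  (111, "Rg"), (112, "Cn"), (113, "Nh"), (114, "Fl"), (115, "Mc"), (116, "Lv"), (117, "Ts"), (118, "Og")]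

-- atomic_numbers = {symbol: num for num, symbol in periodic_table.items()}
def atomicNumbers : PySem.Dict String Int :=
  periodicTable.items.foldl (fun d p => d.insert p.2 p.1) PySem.Dict.empty

-- first component of A's sort_key tuple: 0 for "C", 1 for "H", 2 otherwise
def sortKeyRank (e : String) : Int := if e = "C" then 0 else if e = "H" then 1 else 2
-- second component: atomic_numbers.get(element, 'X').  The 'X' string fallback is
-- modeled as the Int 0: exact wherever the Python returns, because Pre_ excludes the
-- mixed known/unknown lists on which Python's int-vs-str comparison raises TypeError,
-- so inside Pre_ this component is only ever compared between two known symbols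
-- (true atomic numbers) or two unknown symbols (both 0, tie, stable order).
def sortKeyNum (e : String) : Int := (atomicNumbers.get? e).getD 0

-- return sorted(elements, key=sort_key)  -- tuple key (rank, num)
def sort_elements_for_genecp (elements : List String) : List String :=
  PySem.List.sorted2 elements sortKeyRank sortKeyNum

-- ===== PORT B =====
-- element_symbols = ("H He ... Og").split()
def elementOrder : List String :=
  PySem.Str.split₀ "H He Li Be B C N O F Ne Na Mg Al Si P S Cl Ar K Ca Sc Ti V Cr Mn Fe Co Ni Cu Zn Ga Ge As Se Br Kr Rb Sr Y Zr Nb Mo Tc Ru Rh Pd Ag Cd In Sn Sb Te I Xe Cs Ba La Ce Pr Nd Pm Sm Eu Gd Tb Dy Ho Er Tm Yb Lu Hf Ta W Re Os Ir Pt Au Hg Tl Pb Bi Po At Rn Fr Ra Ac Th Pa U Np Pu Am Cm Bk Cf Es Fm Md No Lr Rf Db Sg Bh Hs Mt Ds Rg Cn Nh Fl Mc Lv Ts Og"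

-- the one-pass bucketing loop: (c_list, h_list, counts, unknown)
def altState : Type := List String × List String × PySem.Dict String Int × List String

def altStep (st : altState) (e : String) : altState :=
  if e = "C" then (st.1 ++ [e], st.2.1, st.2.2.1, st.2.2.2)
  else if e = "H" then (st.1, st.2.1 ++ [e], st.2.2.1, st.2.2.2)
  else if elementOrder.contains e then
    (st.1, st.2.1, st.2.2.1.insert e (st.2.2.1.getD e 0 + 1), st.2.2.2)
  else (st.1, st.2.1, st.2.2.1, st.2.2.2 ++ [e])

-- then: result = c_list + h_list; for s in element_symbols: result += [s]*counts.get(s,0);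
-- return result + unknown
def sort_elements_for_genecp_alt (elements : List String) : List String :=
  let st := elements.foldl altStep (([] : List String), ([] : List String),
    (PySem.Dict.empty : PySem.Dict String Int), ([] : List String))
  let result := elementOrder.foldl
    (fun acc s => acc ++ List.replicate (st.2.2.1.getD s 0).toNat s) (st.1 ++ st.2.1)
  result ++ st.2.2.2

-- ===== PRECONDITION & SPEC =====
def knownSymbols : List String := [
  "H", "He", "Li", "Be", "B", "C", "N", "O", "F", "Ne",
  "Na", "Mg", "Al", "Si", "P", "S", "Cl", "Ar", "K", "Ca",
  "Sc", "Ti", "V", "Cr", "Mn", "Fe", "Co", "Ni", "Cu", "Zn",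
  "Ga", "Ge", "As", "Se", "Br", "Kr", "Rb", "Sr", "Y", "Zr",
  "Nb", "Mo", "Tc", "Ru", "Rh", "Pd", "Ag", "Cd", "In", "Sn",
  "Sb", "Te", "I", "Xe", "Cs", "Ba", "La", "Ce", "Pr", "Nd",
  "Pm", "Sm", "Eu", "Gd", "Tb", "Dy", "Ho", "Er", "Tm", "Yb",
  "Lu", "Hf", "Ta", "W", "Re", "Os", "Ir", "Pt", "Au", "Hg",
  "Tl", "Pb", "Bi", "Po", "At", "Rn", "Fr", "Ra", "Ac", "Th",
  "Pa", "U", "Np", "Pu", "Am", "Cm", "Bk", "Cf", "Es", "Fm",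
  "Md", "No", "Lr", "Rf", "Db", "Sg", "Bh", "Hs", "Mt", "Ds",
  "Rg", "Cn", "Nh", "Fl", "Mc", "Lv", "Ts", "Og"]

-- Pre_ excludes exactly the lists containing both a known non-C/H symbol and an unknown
-- symbol: there Python compares an int key with the 'X' string key and raises TypeError
-- (A returns no value).
def Pre_sort_elements_for_genecp (elements : List String) : Prop :=
  ¬ ((∃ e ∈ elements, e ≠ "C" ∧ e ≠ "H" ∧ e ∈ knownSymbols) ∧ (∃ e ∈ elements, e ∉ knownSymbols))
instance (elements : List String) : Decidable (Pre_sort_elements_for_genecp elements) := by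
  unfold Pre_sort_elements_for_genecp; infer_instance

def pvWitness_sort_elements_for_genecp : List String := ["C", "O", "H", "N", "C"]

def Spec_sort_elements_for_genecp (elements : List String) (out : List String) : Prop := out = sort_elements_for_genecp_alt elements
instance (elements : List String) (out : List String) : Decidable (Spec_sort_elements_for_genecp elements out) := by unfold Spec_sort_elements_for_genecp; infer_instance

-- ===== CLAIM (what is proved, stated in full; the proofs are below) =====
def Claim_equal_sort_elements_for_genecp : Prop := ∀ (elements : List String), Dom_sort_elements_for_genecp elements → Pre_sort_elements_for_genecp elements → Spec_sort_elements_for_genecp elements (sort_elements_for_genecp elements)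

-- ===== LEMMAS AND PROOFS =====

-- insertBy passes over a prefix none of whose members x goes before
theorem insertBy_append_of_not_before {α : Type} (p : α → α → Bool) (x : α)
    (l1 l2 : List α) (h : ∀ y ∈ l1, p x y = false) :
    PySem.List.insertBy p x (l1 ++ l2) = l1 ++ PySem.List.insertBy p x l2 := by
  induction l1 with
  | nil => simp
  | cons a t ih =>
    have ha : p x a = false := h a (by simp)
    simp [PySem.List.insertBy, ha, ih (fun y hy => h y (by simp [hy]))]

-- insertBy puts x at the front when x goes before every member
theorem insertBy_all_before {α : Type} (p : α → α → Bool) (x : α)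
    (l : List α) (h : ∀ y ∈ l, p x y = true) :
    PySem.List.insertBy p x l = x :: l := by
  cases l with
  | nil => rfl
  | cons a t => simp [PySem.List.insertBy, h a (by simp)]

-- insertBy only looks at p x ., so predicates agreeing on the members coincide
theorem insertBy_congr {α : Type} (p q : α → α → Bool) (x : α)
    (l : List α) (h : ∀ y ∈ l, p x y = q x y) :
    PySem.List.insertBy p x l = PySem.List.insertBy q x l := by
  induction l with
  | nil => rfl
  | cons a t ih =>
    have ha : p x a = q x a := h a (by simp)
    by_cases hq : q x a = true
    · simp [PySem.List.insertBy, ha, hq]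
    · simp only [Bool.not_eq_true] at hq
      simp [PySem.List.insertBy, ha, hq, ih (fun y hy => h y (by simp [hy]))]

-- the comparison sorted2 uses for the tuple key (sortKeyRank, sortKeyNum)
def lt2 (a b : String) : Bool :=
  decide (sortKeyRank a < sortKeyRank b) ||
    (!decide (sortKeyRank b < sortKeyRank a) && decide (sortKeyNum a < sortKeyNum b))

theorem sorted2_append_singleton (xs : List String) (x : String) :
    PySem.List.sorted2 (xs ++ [x]) sortKeyRank sortKeyNum =
      PySem.List.insertBy lt2 x (PySem.List.sorted2 xs sortKeyRank sortKeyNum) := by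
  simp only [PySem.List.sorted2, List.foldl_append, List.foldl_cons, List.foldl_nil]
  rfl

theorem sorted_append_singleton (xs : List String) (x : String) :
    PySem.List.sorted (xs ++ [x]) sortKeyNum =
      PySem.List.insertBy (fun a b => decide (sortKeyNum a < sortKeyNum b)) x
        (PySem.List.sorted xs sortKeyNum) := by
  simp [PySem.List.sorted, List.foldl_append]

theorem rank_C : sortKeyRank "C" = 0 := by decide
theorem rank_H : sortKeyRank "H" = 1 := by decide
theorem rank_other {e : String} (h1 : e ≠ "C") (h2 : e ≠ "H") : sortKeyRank e = 2 := by
  simp [sortKeyRank, h1, h2]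

def filtC (xs : List String) : List String := xs.filter (fun e => e == "C")
def filtH (xs : List String) : List String := xs.filter (fun e => e == "H")
def filtR (xs : List String) : List String := xs.filter (fun e => !(e == "C") && !(e == "H"))
def filtK (xs : List String) : List String :=
  xs.filter (fun e => !(e == "C") && !(e == "H") && elementOrder.contains e)
def filtU (xs : List String) : List String :=
  xs.filter (fun e => !(e == "C") && !(e == "H") && !(elementOrder.contains e))

theorem mem_filtC {xs : List String} {y : String} (h : y ∈ filtC xs) : y = "C" := by
  have := (List.mem_filter.mp h).2; simpa using this
theorem mem_filtH {xs : List String} {y : String} (h : y ∈ filtH xs) : y = "H" := by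
  have := (List.mem_filter.mp h).2; simpa using this
theorem mem_filtR {xs : List String} {y : String} (h : y ∈ filtR xs) : y ≠ "C" ∧ y ≠ "H" := by
  have := (List.mem_filter.mp h).2
  simp only [Bool.and_eq_true, Bool.not_eq_true', beq_eq_false_iff_ne] at this
  exact this

-- A's stable sort under the tuple key splits into the three blocks (C's, H's, rest sorted)
theorem sorted2_split (xs : List String) :
    PySem.List.sorted2 xs sortKeyRank sortKeyNum =
      filtC xs ++ filtH xs ++ PySem.List.sorted (filtR xs) sortKeyNum := by
  induction xs using List.reverseRecOn with
  | nil => rfl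
  | append_singleton xs x ih =>
    rw [sorted2_append_singleton, ih, List.append_assoc]
    by_cases hc : x = "C"
    · subst hc
      rw [insertBy_append_of_not_before lt2 "C" (filtC xs)
            (filtH xs ++ PySem.List.sorted (filtR xs) sortKeyNum)
            (fun y hy => by rw [mem_filtC hy]; simp [lt2, rank_C]),
          insertBy_all_before lt2 "C" _ (fun y hy => by
            rcases List.mem_append.mp hy with h | h
            · rw [mem_filtH h]; simp [lt2, rank_C, rank_H]
            · rcases mem_filtR ((PySem.List.mem_sorted _ _ _ _).mp h) with ⟨h1, h2⟩
              simp [lt2, rank_C, rank_other h1 h2])]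
      simp [filtC, filtH, filtR, List.filter_append]
    · by_cases hh : x = "H"
      · subst hh
        rw [insertBy_append_of_not_before lt2 "H" (filtC xs) _
              (fun y hy => by rw [mem_filtC hy]; simp [lt2, rank_C, rank_H]),
            insertBy_append_of_not_before lt2 "H" (filtH xs) _
              (fun y hy => by rw [mem_filtH hy]; simp [lt2, rank_H]),
            insertBy_all_before lt2 "H" _ (fun y hy => by
              rcases mem_filtR ((PySem.List.mem_sorted _ _ _ _).mp hy) with ⟨h1, h2⟩
              simp [lt2, rank_H, rank_other h1 h2])]
        simp [filtC, filtH, filtR, List.filter_append]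
      · rw [insertBy_append_of_not_before lt2 x (filtC xs) _
              (fun y hy => by rw [mem_filtC hy]; simp [lt2, rank_C, rank_other hc hh]),
            insertBy_append_of_not_before lt2 x (filtH xs) _
              (fun y hy => by rw [mem_filtH hy]; simp [lt2, rank_H, rank_other hc hh]),
            insertBy_congr lt2 (fun a b => decide (sortKeyNum a < sortKeyNum b)) x _
              (fun y hy => by
                rcases mem_filtR ((PySem.List.mem_sorted _ _ _ _).mp hy) with ⟨h1, h2⟩
                simp [lt2, rank_other hc hh, rank_other h1 h2]),
            ← sorted_append_singleton]
        have hR : filtR (xs ++ [x]) = filtR xs ++ [x] := by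
          simp [filtR, List.filter_append, hc, hh]
        rw [hR]
        simp [filtC, filtH, List.filter_append, hc, hh]


-- ----- B-side facts -----

set_option maxRecDepth 10000 in
theorem nodupEO : elementOrder.Nodup := by decide

set_option maxRecDepth 100000 in
set_option maxHeartbeats 4000000 in
theorem keysAN : atomicNumbers.keys = elementOrder := by decide

set_option maxRecDepth 100000 in
set_option maxHeartbeats 8000000 in
theorem pairwiseEO : elementOrder.Pairwise (fun a b => sortKeyNum a < sortKeyNum b) := by decide

-- the key of an unknown symbol is the modeled 'X' fallback 0
theorem key_unknown {e : String} (h : e ∉ elementOrder) : sortKeyNum e = 0 := by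
  unfold sortKeyNum
  rw [(PySem.Dict.get?_eq_none_iff_not_mem_keys atomicNumbers e).mpr (by rw [keysAN]; exact h)]
  rfl

-- B's bucketing loop computes the four filters (counts as a dict-count fold over filtK)
theorem altLoop_eq (xs : List String) : ∀ (c h u : List String) (d : PySem.Dict String Int),
    xs.foldl altStep (c, h, d, u) =
      (c ++ filtC xs, h ++ filtH xs,
       (filtK xs).foldl (fun d e => d.insert e (d.getD e 0 + 1)) d, u ++ filtU xs) := by
  induction xs with
  | nil => intro c h u d; simp [filtC, filtH, filtK, filtU]
  | cons e t ih =>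
    intro c h u d
    by_cases hc : e = "C"
    · simp [altStep, hc, ih, filtC, filtH, filtK, filtU]
    · by_cases hh : e = "H"
      · simp [altStep, hh, ih, filtC, filtH, filtK, filtU]
      · by_cases hk : e ∈ elementOrder
        · simp [altStep, hc, hh, hk, ih, filtC, filtH, filtK, filtU]
        · simp [altStep, hc, hh, hk, ih, filtC, filtH, filtK, filtU]

-- counting sort: the stable sort of a list of known symbols is the emission of its counts
-- in periodic-table order
theorem sorted_eq_emit (rs : List String) (h : ∀ e ∈ rs, e ∈ elementOrder) :
    PySem.List.sorted rs sortKeyNum =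
      elementOrder.flatMap (fun s => List.replicate (rs.count s) s) := by
  induction rs using List.reverseRecOn with
  | nil =>
    simp only [List.count_nil, List.replicate_zero]
    rw [List.flatMap_eq_nil_iff.mpr (fun _ _ => rfl)]
    rfl
  | append_singleton rs x ih =>
    have hx : x ∈ elementOrder := h x (by simp)
    obtain ⟨L1, L2, hsplit⟩ := List.mem_iff_append.mp hx
    have hnd := nodupEO; rw [hsplit] at hnd
    have hxL1 : x ∉ L1 := fun hm => (List.disjoint_of_nodup_append hnd hm) (by simp)
    have hpw := pairwiseEO; rw [hsplit] at hpw
    obtain ⟨pw1, pw2, cross⟩ := List.pairwise_append.mp hpw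
    have hlt1 : ∀ s ∈ L1, sortKeyNum s < sortKeyNum x := fun s hs => cross s hs x (by simp)
    have hlt2 : ∀ s ∈ L2, sortKeyNum x < sortKeyNum s :=
      (List.pairwise_cons.mp pw2).1
    have hxL2 : x ∉ L2 := fun hm => lt_irrefl _ (hlt2 x hm)
    have hcnt_ne : ∀ s, s ≠ x → (rs ++ [x]).count s = rs.count s := by
      intro s hs
      simp [List.count_append, List.count_singleton, (beq_eq_false_iff_ne).mpr (Ne.symm hs)]
    have hg_ne : ∀ (L : List String), x ∉ L →
        L.flatMap (fun s => List.replicate ((rs ++ [x]).count s) s) =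
          L.flatMap (fun s => List.replicate (rs.count s) s) := by
      intro L hxL
      exact List.flatMap_congr (fun s hs => by
        rw [hcnt_ne s (fun he => hxL (he ▸ hs))])
    have hcx : (rs ++ [x]).count x = rs.count x + 1 := by
      simp [List.count_append]
    rw [sorted_append_singleton, ih (fun e he => h e (by simp [he])), hsplit]
    simp only [List.flatMap_append, List.flatMap_cons]
    rw [hg_ne L1 hxL1, hg_ne L2 hxL2, hcx, List.replicate_succ',
        insertBy_append_of_not_before _ x (L1.flatMap _) _ (fun y hy => by
          obtain ⟨s, hs, hys⟩ := List.mem_flatMap.mp hy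
          rw [List.eq_of_mem_replicate hys]
          exact decide_eq_false (not_lt_of_gt (hlt1 s hs))),
        insertBy_append_of_not_before _ x (List.replicate (rs.count x) x) _ (fun y hy => by
          rw [List.eq_of_mem_replicate hy]
          exact decide_eq_false (lt_irrefl _)),
        insertBy_all_before _ x (L2.flatMap _) (fun y hy => by
          obtain ⟨s, hs, hys⟩ := List.mem_flatMap.mp hy
          rw [List.eq_of_mem_replicate hys]
          exact decide_eq_true (hlt2 s hs))]
    simp

-- sorting a list of all-unknown symbols (all keys 0) leaves it unchanged
theorem sorted_unknown (us : List String) (h : ∀ e ∈ us, e ∉ elementOrder) :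
    PySem.List.sorted us sortKeyNum = us := by
  apply PySem.List.sorted_eq_self_of_pairwise
  apply List.pairwise_of_forall_mem_list
  intro a ha b hb
  rw [key_unknown (h a ha), key_unknown (h b hb)]

set_option maxRecDepth 10000 in
theorem elementOrder_eq : elementOrder = knownSymbols := by decide

-- B's result in closed form
theorem alt_eq (xs : List String) :
    sort_elements_for_genecp_alt xs =
      filtC xs ++ filtH xs ++
        elementOrder.flatMap (fun s => List.replicate ((filtK xs).count s) s) ++ filtU xs := by
  unfold sort_elements_for_genecp_alt
  rw [altLoop_eq xs [] [] [] PySem.Dict.empty]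
  simp only [List.nil_append]
  rw [PySem.List.foldl_append_eq_flatMap]
  have : ∀ s, (((filtK xs).foldl (fun (d : PySem.Dict String Int) e => d.insert e (d.getD e 0 + 1))
      PySem.Dict.empty).getD s 0).toNat = (filtK xs).count s := by
    intro s
    rw [PySem.Dict.getD_foldl_insert_add_one]
    simp [PySem.Dict.getD_empty]
  simp only [this, List.append_assoc]

-- ===== VERDICT (by name: the statement is the Claim_ definition above) =====
theorem sort_elements_for_genecp_spec : Claim_equal_sort_elements_for_genecp := by
  intro elements _ hpre
  unfold Pre_sort_elements_for_genecp at hpre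
  rw [← elementOrder_eq] at hpre
  unfold Spec_sort_elements_for_genecp
  unfold sort_elements_for_genecp
  rw [alt_eq, sorted2_split]
  by_cases hU : ∃ e ∈ elements, e ∉ elementOrder
  · -- some unknown symbol: Pre_ forbids known non-C/H symbols
    have hnoK : ∀ e ∈ elements, e ≠ "C" → e ≠ "H" → e ∉ elementOrder := by
      intro e he h1 h2 hmem
      exact hpre ⟨⟨e, he, h1, h2, hmem⟩, hU⟩
    have hK : filtK elements = [] := by
      unfold filtK
      rw [List.filter_eq_nil_iff]
      intro e he hp
      simp only [Bool.and_eq_true, Bool.not_eq_true', beq_eq_false_iff_ne] at hp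
      obtain ⟨⟨h1, h2⟩, hm⟩ := hp
      exact hnoK e he h1 h2 (by simpa using hm)
    have hRU : filtR elements = filtU elements := by
      unfold filtR filtU
      refine List.filter_congr (fun e he => ?_)
      by_cases h1 : e = "C"
      · simp [h1]
      · by_cases h2 : e = "H"
        · simp [h2]
        · have := hnoK e he h1 h2
          simp [this]
    rw [hK, hRU, sorted_unknown (filtU elements) (fun e he => by
      have hp := (List.mem_filter.mp he).2
      simp only [Bool.and_eq_true, Bool.not_eq_true'] at hp
      simpa using hp.2)]
    simp
  · -- every element known: no unknowns, rest = known rest, counting sort applies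
    push Not at hU
    have hKR : filtR elements = filtK elements := by
      unfold filtR filtK
      refine (List.filter_congr (fun e he => ?_)).symm
      have := hU e he
      simp [this]
    have hUe : filtU elements = [] := by
      unfold filtU
      rw [List.filter_eq_nil_iff]
      intro e he hp
      simp only [Bool.and_eq_true, Bool.not_eq_true'] at hp
      exact absurd (hU e he) (by simpa using hp.2)
    rw [hKR, hUe, sorted_eq_emit (filtK elements) (fun e he => by
      exact hU e (List.mem_of_mem_filter he))]
    simp
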